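-- pv_equiv track=rewrite | github.com/Karimoto/Dante-bot | cogs/stat.py | calculate_slayer
-- ===== SOURCE A (Python) =====
-- def calculate_slayer(xp,monster):
--     if(xp is None):
--         return(None)
--     if(monster=='zombie'):
--         xp_cumsum = [5 ,     20 ,    220 ,   1220,    6220   ,26220  ,126220,  526220, 1526220]
--     if(monster=='spider'):
--         xp_cumsum = [10 ,     35 ,    235 ,   1235,    6235   ,26235 , 126235 , 526235, 1526235]
--     if(monster=='wolf'):
--         xp_cumsum = [10  ,    40  ,   290  ,  1790 ,   6790   ,26790,  126790,  526790, 1526790]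
--
--     return(min(9,(sum([xp>i for i in xp_cumsum]))))
-- ===== SOURCE B (Python) =====
-- def calculate_slayer(xp, monster):
--     if xp is None:
--         return None
--     # per-level xp gains: monster-specific first four levels, shared tail
--     head = {'zombie': [5, 15, 200, 1000],
--             'spider': [10, 25, 200, 1000],
--             'wolf':   [10, 30, 250, 1500]}[monster]
--     level = 0
--     total = 0
--     for gain in head + [5000, 20000, 100000, 400000, 1000000]:
--         total += gain
--         if xp <= total:
--             break
--         level += 1
--     return level
-- ===== Notes on version B (the rewrite author's own statement) =====
-- stated objective: alternative
-- what changed: Replaces the per-monster cumulative-threshold lists and the 0/1-comprehension sum with a dict of per-level xp increments (monster-specific head plus shared tail) walked with a running total, an early break, and a level counter.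
-- outside the precondition, e.g. on calculate_slayer(5, 'creeper'): A raises NameError, B raises KeyError
import Mathlib
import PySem

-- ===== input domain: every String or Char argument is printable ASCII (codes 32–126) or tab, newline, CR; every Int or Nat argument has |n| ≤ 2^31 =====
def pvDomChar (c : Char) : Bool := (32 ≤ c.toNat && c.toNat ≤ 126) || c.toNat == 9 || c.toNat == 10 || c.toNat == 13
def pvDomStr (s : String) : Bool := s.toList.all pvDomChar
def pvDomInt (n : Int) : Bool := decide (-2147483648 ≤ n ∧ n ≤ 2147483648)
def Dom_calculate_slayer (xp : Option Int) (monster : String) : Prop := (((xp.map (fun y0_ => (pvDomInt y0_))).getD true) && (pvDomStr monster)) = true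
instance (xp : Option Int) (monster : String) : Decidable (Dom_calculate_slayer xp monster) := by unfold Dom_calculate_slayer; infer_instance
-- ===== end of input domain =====

-- B replaces A's per-monster cumulative-threshold lists and 0/1-comprehension sum by a dict of
-- per-level xp INCREMENTS walked with a running total and an early break (alternative structure, no speed claim).


-- ===== PORT A =====
-- A's threshold if-chain, in source order; 'none' marks the unknown-monster case
-- where the Python raises NameError (excluded by Pre_).
def pvTableA (monster : String) : Option (List Int) :=
  if monster = "zombie" then some [5, 20, 220, 1220, 6220, 26220, 126220, 526220, 1526220]
  else if monster = "spider" then some [10, 35, 235, 1235, 6235, 26235, 126235, 526235, 1526235]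
  else if monster = "wolf" then some [10, 40, 290, 1790, 6790, 26790, 126790, 526790, 1526790]
  else none

def calculate_slayer (xp : Option Int) (monster : String) : Option Int :=
  match xp with
  | none => none
  | some x =>
    match pvTableA monster with
    | none => none   -- Python: NameError (outside Pre_)
    | some xs => some (min 9 ((xs.map (fun i => if x > i then (1 : Int) else 0)).sum))

-- ===== PORT B =====
-- Source B's for-loop with running total and early break, as structural recursion on the gain list.
def pvWalk (x : Int) : List Int → Int → Int → Int
  | [], _, level => level
  | gain :: rest, total, level =>
    let t := total + gain
    if x ≤ t then level else pvWalk x rest t (level + 1)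

-- Source B's dict literal of monster-specific head gains (lookup failure = KeyError, outside Pre_)
def pvHeads : PySem.Dict String (List Int) :=
  PySem.Dict.ofList [("zombie", [5, 15, 200, 1000]), ("spider", [10, 25, 200, 1000]), ("wolf", [10, 30, 250, 1500])]

def calculate_slayer_alt (xp : Option Int) (monster : String) : Option Int :=
  match xp with
  | none => none
  | some x =>
    match PySem.Dict.get? pvHeads monster with
    | none => none   -- Python: KeyError (outside Pre_)
    | some head => some (pvWalk x (head ++ [5000, 20000, 100000, 400000, 1000000]) 0 0)

-- ===== PRECONDITION & SPEC =====
-- Pre_ excludes unknown monsters with xp ≠ None, on which A raises NameError (xp_cumsum never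
-- assigned) and B raises KeyError; A returns a value everywhere inside Pre_.
def Pre_calculate_slayer (xp : Option Int) (monster : String) : Prop :=
  xp = none ∨ monster = "zombie" ∨ monster = "spider" ∨ monster = "wolf"
instance (xp : Option Int) (monster : String) : Decidable (Pre_calculate_slayer xp monster) := by unfold Pre_calculate_slayer; infer_instance
def pvWitness_calculate_slayer : Option Int × String := (some 250, "zombie")

def Spec_calculate_slayer (xp : Option Int) (monster : String) (out : Option Int) : Prop := out = calculate_slayer_alt xp monster
instance (xp : Option Int) (monster : String) (out : Option Int) : Decidable (Spec_calculate_slayer xp monster out) := by unfold Spec_calculate_slayer; infer_instance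

-- ===== CLAIM (what is proved, stated in full; the proofs are below) =====
def Claim_equal_calculate_slayer : Prop := ∀ (xp : Option Int) (monster : String), Dom_calculate_slayer xp monster → Pre_calculate_slayer xp monster → Spec_calculate_slayer xp monster (calculate_slayer xp monster)

-- ===== LEMMAS AND PROOFS =====

-- running totals of a gain list starting from total
def pvCums : List Int → Int → List Int
  | [], _ => []
  | g :: r, total => (total + g) :: pvCums r (total + g)

lemma pvCums_lb (gs : List Int) : ∀ (total : Int), (∀ g ∈ gs, 0 < g) →
    ∀ t ∈ pvCums gs total, total < t := by
  induction gs with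
  | nil => intro total _ t ht; simp [pvCums] at ht
  | cons g r ih =>
    intro total hpos t ht
    simp only [pvCums, List.mem_cons] at ht
    rcases ht with rfl | ht
    · have := hpos g (by simp); omega
    · have := ih (total + g) (fun g' hg' => hpos g' (by simp [hg'])) t ht
      have := hpos g (by simp); omega

-- the early-break walk counts the running totals strictly below x
lemma pvWalk_eq (x : Int) (gs : List Int) : ∀ (total level : Int), (∀ g ∈ gs, 0 < g) →
    pvWalk x gs total level =
      level + ((pvCums gs total).map (fun t => if x > t then (1 : Int) else 0)).sum := by
  induction gs with
  | nil => intro total level _; simp [pvWalk, pvCums]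
  | cons g r ih =>
    intro total level hpos
    simp only [pvWalk, pvCums, List.map_cons, List.sum_cons]
    by_cases h : x ≤ total + g
    · simp only [if_pos h]
      have hz : ((pvCums r (total + g)).map (fun t => if x > t then (1 : Int) else 0)).sum = 0 := by
        apply List.sum_eq_zero
        intro y hy
        simp only [List.mem_map] at hy
        obtain ⟨t, ht, rfl⟩ := hy
        have := pvCums_lb r (total + g) (fun g' hg' => hpos g' (by simp [hg'])) t ht
        simp only [if_neg (by omega : ¬ x > t)]
      rw [hz]
      simp only [if_neg (by omega : ¬ x > total + g)]
      omega
    · simp only [if_neg h]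
      rw [ih (total + g) (level + 1) (fun g' hg' => hpos g' (by simp [hg']))]
      simp only [if_pos (by omega : x > total + g)]
      omega

-- an indicator sum over a list lies between 0 and the list's length
lemma pvIndSum_bounds (x : Int) (c : List Int) :
    0 ≤ ((c.map (fun t => if x > t then (1 : Int) else 0)).sum) ∧
      ((c.map (fun t => if x > t then (1 : Int) else 0)).sum) ≤ c.length := by
  induction c with
  | nil => simp
  | cons t r ih =>
    simp only [List.map_cons, List.sum_cons, List.length_cons]
    constructor <;> split_ifs <;> push_cast <;> omega

lemma pv_monster (x : Int) (cums heads : List Int)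
    (hpos : ∀ g ∈ heads ++ [5000, 20000, 100000, 400000, 1000000], 0 < g)
    (hc : pvCums (heads ++ [5000, 20000, 100000, 400000, 1000000]) 0 = cums)
    (hl : cums.length = 9) :
    (some (min 9 ((cums.map (fun i => if x > i then (1 : Int) else 0)).sum)) : Option Int) =
      some (pvWalk x (heads ++ [5000, 20000, 100000, 400000, 1000000]) 0 0) := by
  rw [pvWalk_eq x _ 0 0 hpos, hc]
  have hb := pvIndSum_bounds x cums
  rw [hl] at hb
  congr 1
  omega


-- ===== VERDICT (by name: the statement is the Claim_ definition above) =====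
theorem calculate_slayer_spec : Claim_equal_calculate_slayer := by
  intro xp monster _ pre
  unfold Spec_calculate_slayer
  cases xp with
  | none => rfl
  | some x =>
    have hm : monster = "zombie" ∨ monster = "spider" ∨ monster = "wolf" :=
      pre.resolve_left (by simp)
    rcases hm with h | h | h <;> subst h <;>
      simp only [calculate_slayer, calculate_slayer_alt] <;>
      [rw [show pvTableA "zombie" = some [5, 20, 220, 1220, 6220, 26220, 126220, 526220, 1526220] from rfl,
           show PySem.Dict.get? pvHeads "zombie" = some [5, 15, 200, 1000] from rfl];
       rw [show pvTableA "spider" = some [10, 35, 235, 1235, 6235, 26235, 126235, 526235, 1526235] from rfl,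
           show PySem.Dict.get? pvHeads "spider" = some [10, 25, 200, 1000] from rfl];
       rw [show pvTableA "wolf" = some [10, 40, 290, 1790, 6790, 26790, 126790, 526790, 1526790] from rfl,
           show PySem.Dict.get? pvHeads "wolf" = some [10, 30, 250, 1500] from rfl]] <;>
      exact pv_monster x _ _ (by decide) (by decide) (by decide)
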